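-- pv_equiv track=rewrite | github.com/Jakerop/advent_of_code | 4/main.py | count_subset
-- ===== SOURCE A (Python) =====
-- def count_subset(sets_list):
--     subsets = 0
--     for i, set1 in enumerate(sets_list[:-1]):
--         for set2 in sets_list[i+1:]:
--             if set1.issubset(set2):
--                 subsets += 1
--             elif set2.issubset(set1):
--                 subsets += 1
--     return subsets
-- ===== SOURCE B (Python) =====
-- def count_subset(sets_list):
--     ordered = sorted(sets_list, key=len)
--     total = 0
--     seen = []
--     for big in ordered:
--         for small in seen:
--             if small.issubset(big):
--                 total += 1
--         seen.append(big)
--     return total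
-- ===== Notes on version B (the rewrite author's own statement) =====
-- stated objective: alternative
-- what changed: B sorts the sets by size ascending and makes a single directional issubset check against a growing 'seen' prefix, replacing A's bidirectional if/elif over index slices; smaller-first order makes one direction sufficient.
import Mathlib
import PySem

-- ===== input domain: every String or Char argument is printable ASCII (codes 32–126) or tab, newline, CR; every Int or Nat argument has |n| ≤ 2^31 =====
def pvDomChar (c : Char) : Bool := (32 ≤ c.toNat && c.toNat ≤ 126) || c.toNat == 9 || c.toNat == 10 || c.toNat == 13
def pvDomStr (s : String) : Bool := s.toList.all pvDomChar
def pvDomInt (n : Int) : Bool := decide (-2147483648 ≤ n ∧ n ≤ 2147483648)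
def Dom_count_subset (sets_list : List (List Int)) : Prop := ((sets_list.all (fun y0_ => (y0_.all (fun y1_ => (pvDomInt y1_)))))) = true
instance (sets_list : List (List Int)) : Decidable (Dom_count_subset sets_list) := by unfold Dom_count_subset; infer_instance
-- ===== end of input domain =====

-- B sorts the sets by size ascending and scans each against the already-seen (smaller) ones with a
-- single directional subset test, instead of A's bidirectional if/elif over enumerate+slices.

-- set.issubset: every element of s is an element of t
def pyIsSubset (s t : List Int) : Bool := s.all (fun x => t.contains x)

-- ===== PORT A =====
def count_subset (sets_list : List (List Int)) : Int :=
  (PySem.List.enumerate (PySem.List.slice sets_list none (some (-1)))).foldl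
    (fun subsets p =>
      (PySem.List.slice sets_list (some (p.1 + 1)) none).foldl
        (fun subsets set2 =>
          if pyIsSubset p.2 set2 then subsets + 1
          else if pyIsSubset set2 p.2 then subsets + 1
          else subsets) subsets) 0

-- ===== PORT B =====
def count_subset_alt (sets_list : List (List Int)) : Int :=
  let ordered := PySem.List.sorted sets_list (fun s => (s.length : Int)) false
  (ordered.foldl
    (fun st big =>
      (st.2.foldl (fun total small => if pyIsSubset small big then total + 1 else total) st.1,
       st.2 ++ [big]))
    ((0 : Int), ([] : List (List Int)))).1

-- ===== PRECONDITION & SPEC =====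
-- The Python argument is a list of SETS; under the type convention each inner list holds the
-- distinct elements of a set, so Pre_ requires the inner lists to be duplicate-free (on lists
-- with duplicated elements the Python function is never called; no returning input is excluded).
def Pre_count_subset (sets_list : List (List Int)) : Prop :=
  ∀ s ∈ sets_list, s.Nodup
instance (sets_list : List (List Int)) : Decidable (Pre_count_subset sets_list) := by
  unfold Pre_count_subset; infer_instance
def pvWitness_count_subset : List (List Int) := [[1, 2], [1], [3]]

def Spec_count_subset (sets_list : List (List Int)) (out : Int) : Prop := out = count_subset_alt sets_list
instance (sets_list : List (List Int)) (out : Int) : Decidable (Spec_count_subset sets_list out) := by unfold Spec_count_subset; infer_instance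

-- ===== CLAIM (what is proved, stated in full; the proofs are below) =====
def Claim_equal_count_subset : Prop := ∀ (sets_list : List (List Int)), Dom_count_subset sets_list → Pre_count_subset sets_list → Spec_count_subset sets_list (count_subset sets_list)

-- ===== LEMMAS AND PROOFS =====

-- symmetric pair predicate of A's if/elif
def pairP (x y : List Int) : Bool := pyIsSubset x y || pyIsSubset y x

-- count of unordered pairs satisfying pairP, head recursion
def pcP : List (List Int) → Nat
  | [] => 0
  | x :: xs => xs.countP (pairP x) + pcP xs

-- count of ordered pairs (earlier ⊆ later), head recursion
def pcQ : List (List Int) → Nat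
  | [] => 0
  | x :: xs => xs.countP (fun y => pyIsSubset x y) + pcQ xs

lemma sum_map_cast {α : Type} (g : α → Nat) (l : List α) :
    (l.map (fun p => ((g p : Nat) : Int))).sum = ((l.map g).sum : Int) := by
  induction l with
  | nil => simp
  | cons a l ih => simp [ih]

lemma pyIsSubset_iff (s t : List Int) : pyIsSubset s t = true ↔ ∀ x ∈ s, x ∈ t := by
  simp [pyIsSubset]

-- a no-smaller set contained in another forces containment the other way (for duplicate-free lists)
lemma subset_back {a b : List Int} (ha : a.Nodup) (hb : b.Nodup)
    (hlen : a.length ≤ b.length) (h : pyIsSubset b a = true) : pyIsSubset a b = true := by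
  rw [pyIsSubset_iff] at h ⊢
  have hsub : b.toFinset ⊆ a.toFinset := by
    intro x hx
    rw [List.mem_toFinset] at hx ⊢
    exact h x hx
  have hcard : a.toFinset.card ≤ b.toFinset.card := by
    have h1 : a.toFinset.card = a.length := List.toFinset_card_of_nodup ha
    have h2 : b.toFinset.card = b.length := List.toFinset_card_of_nodup hb
    omega
  have heq : b.toFinset = a.toFinset := Finset.eq_of_subset_of_card_le hsub hcard
  intro x hx
  have : x ∈ a.toFinset := by rwa [List.mem_toFinset]
  rw [← heq, List.mem_toFinset] at this
  exact this

lemma pairP_comm (x y : List Int) : pairP x y = pairP y x := by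
  simp [pairP, Bool.or_comm]

lemma pcP_perm {l l' : List (List Int)} (h : l.Perm l') : pcP l = pcP l' := by
  induction h with
  | nil => rfl
  | cons x h ih => simp [pcP, h.countP_eq, ih]
  | swap x y l =>
      simp only [pcP, List.countP_cons]
      rw [pairP_comm x y]
      omega
  | trans h1 h2 ih1 ih2 => omega

-- in a length-ascending duplicate-free list the bidirectional test equals the directional one
lemma pcP_eq_pcQ : ∀ (m : List (List Int)), (∀ y ∈ m, y.Nodup) →
    m.Pairwise (fun a b => (a.length : Int) ≤ (b.length : Int)) → pcP m = pcQ m := by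
  intro m
  induction m with
  | nil => intro _ _; rfl
  | cons x xs ih =>
      intro hnd hpw
      rw [List.pairwise_cons] at hpw
      have hcnt : xs.countP (pairP x) = xs.countP (fun y => pyIsSubset x y) := by
        apply List.countP_congr
        intro y hy
        have hlen : x.length ≤ y.length := by
          have := hpw.1 y hy; exact_mod_cast this
        cases hxy : pyIsSubset x y with
        | true => simp [pairP, hxy]
        | false =>
            simp only [pairP, hxy, Bool.false_or]
            cases hyx : pyIsSubset y x with
            | false => rfl
            | true =>
                have := subset_back (hnd x (by simp)) (hnd y (by simp [hy])) hlen hyx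
                rw [this] at hxy; cases hxy
      simp only [pcP, pcQ, hcnt]
      rw [ih (fun y hy => hnd y (by simp [hy])) hpw.2]

-- index-shift for A's outer loop: enumerate one step later over a one-longer list
lemma sumA_shift (f : List Int → List (List Int) → Nat) :
    ∀ (m : List (List Int)) (s : Nat) (x : List Int) (L : List (List Int)),
    ((PySem.List.enumerate m ((s : Int) + 1)).map
        (fun p => f p.2 (PySem.List.slice (x :: L) (some (p.1 + 1)) none))).sum
      = ((PySem.List.enumerate m (s : Int)).map
        (fun p => f p.2 (PySem.List.slice L (some (p.1 + 1)) none))).sum := by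
  intro m
  induction m with
  | nil => intro s x L; simp [PySem.List.enumerate_nil]
  | cons z m ih =>
      intro s x L
      rw [PySem.List.enumerate_cons, PySem.List.enumerate_cons]
      simp only [List.map_cons, List.sum_cons]
      have h1 : PySem.List.slice (x :: L) (some ((s : Int) + 1 + 1)) none
          = PySem.List.slice L (some ((s : Int) + 1)) none := by
        have e1 : (s : Int) + 1 + 1 = ((s + 2 : Nat) : Int) := by push_cast; ring
        have e2 : (s : Int) + 1 = ((s + 1 : Nat) : Int) := by push_cast; ring
        rw [e1, e2, PySem.List.slice_from_natCast, PySem.List.slice_from_natCast]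
        simp [List.drop_succ_cons]
      have e3 : (s : Int) + 1 + 1 = ((s + 1 : Nat) : Int) + 1 := by push_cast; ring
      rw [h1]
      congr 1
      rw [e3]
      have e4 : ((s + 1 : Nat) : Int) = (s : Int) + 1 := by push_cast; ring
      rw [ih (s + 1) x L, e4]

-- A's value as the symmetric pair count
lemma countA_eq_pcP : ∀ (l : List (List Int)), count_subset l = (pcP l : Int) := by
  intro l
  have hgen : ∀ (l : List (List Int)),
      ((PySem.List.enumerate l.dropLast (0 : Int)).map
        (fun p => (PySem.List.slice l (some (p.1 + 1)) none).countP (pairP p.2))).sum = pcP l := by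
    intro l
    induction l with
    | nil => simp [pcP]
    | cons x xs ih =>
        cases xs with
        | nil => simp [pcP, PySem.List.enumerate_nil]
        | cons y ys =>
            rw [show (x :: y :: ys).dropLast = x :: (y :: ys).dropLast from rfl]
            rw [PySem.List.enumerate_cons]
            simp only [List.map_cons, List.sum_cons]
            have h1 : PySem.List.slice (x :: y :: ys) (some ((0 : Int) + 1)) none = y :: ys := by
              norm_num [PySem.List.slice_from_one]
            rw [h1]
            have h2 := sumA_shift (fun a b => b.countP (pairP a)) (y :: ys).dropLast 0 x (y :: ys)
            norm_num at h2 ⊢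
            rw [h2, ih]
            simp [pcP]
  -- turn the double fold into that sum
  unfold count_subset
  rw [PySem.List.slice_to_neg_one]
  have hinner : ∀ (acc : Int) (x : List Int) (ys : List (List Int)),
      ys.foldl (fun subsets set2 =>
          if pyIsSubset x set2 then subsets + 1
          else if pyIsSubset set2 x then subsets + 1
          else subsets) acc = acc + (ys.countP (pairP x) : Int) := by
    intro acc x ys
    rw [← PySem.List.foldl_if_add_one (pairP x)]
    apply PySem.List.foldl_congr_mem
    intro a z _
    by_cases h1 : pyIsSubset x z = true <;> by_cases h2 : pyIsSubset z x = true <;>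
      simp [pairP, h1, h2]
  have hcongr :
      (PySem.List.enumerate l.dropLast).foldl
        (fun subsets p =>
          (PySem.List.slice l (some (p.1 + 1)) none).foldl
            (fun subsets set2 =>
              if pyIsSubset p.2 set2 then subsets + 1
              else if pyIsSubset set2 p.2 then subsets + 1
              else subsets) subsets) (0 : Int)
        = (PySem.List.enumerate l.dropLast).foldl
            (fun subsets p =>
              subsets + ((PySem.List.slice l (some (p.1 + 1)) none).countP (pairP p.2) : Int)) (0 : Int) :=
    PySem.List.foldl_congr_mem _ _ _ _ (by intro acc p _; exact hinner acc p.2 _)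
  rw [hcongr]
  rw [PySem.List.foldl_add]
  rw [sum_map_cast]
  rw [hgen l]
  simp

-- B's value as the directional pair count over the sorted list
lemma countB_eq_pcQ : ∀ (l : List (List Int)),
    count_subset_alt l = (pcQ (PySem.List.sorted l (fun s => (s.length : Int)) false) : Int) := by
  intro l
  have hgen : ∀ (m : List (List Int)) (seen : List (List Int)) (t : Int),
      (m.foldl (fun st big =>
          (st.2.foldl (fun total small => if pyIsSubset small big then total + 1 else total) st.1,
           st.2 ++ [big])) (t, seen)).1
        = t + ((m.map (fun y => seen.countP (fun s => pyIsSubset s y))).sum : Int) + (pcQ m : Int) := by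
    intro m
    induction m with
    | nil => intro seen t; simp [pcQ]
    | cons x xs ih =>
        intro seen t
        simp only [List.foldl_cons]
        rw [PySem.List.foldl_if_add_one (fun s => pyIsSubset s x)]
        rw [ih (seen ++ [x]) (t + (seen.countP (fun s => pyIsSubset s x) : Int))]
        have hsplit : (xs.map (fun y => (seen ++ [x]).countP (fun s => pyIsSubset s y))).sum
            = (xs.map (fun y => seen.countP (fun s => pyIsSubset s y))).sum
              + xs.countP (fun y => pyIsSubset x y) := by
          clear ih
          induction xs with
          | nil => simp
          | cons z zs ihz =>
              simp only [List.map_cons, List.sum_cons, List.countP_cons]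
              rw [ihz]
              cases hpx : pyIsSubset x z <;>
                simp [List.countP_append, hpx] <;> omega
        rw [hsplit]
        simp only [pcQ, Nat.cast_add, List.map_cons, List.sum_cons]
        push_cast
        ring
  unfold count_subset_alt
  rw [hgen]
  simp

-- ===== VERDICT (by name: the statement is the Claim_ definition above) =====
theorem count_subset_spec : Claim_equal_count_subset := by
  intro l _ hpre
  unfold Spec_count_subset
  rw [countA_eq_pcP, countB_eq_pcQ]
  have hperm : (PySem.List.sorted l (fun s => (s.length : Int)) false).Perm l :=
    PySem.List.sorted_perm l _ _
  have hnd : ∀ y ∈ PySem.List.sorted l (fun s => (s.length : Int)) false, y.Nodup := by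
    intro y hy
    exact hpre y (hperm.mem_iff.mp hy)
  have hpw := PySem.List.sorted_pairwise l (fun s => (s.length : Int))
  rw [pcP_perm hperm.symm, pcP_eq_pcQ _ hnd hpw]
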